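-- pv_equiv track=rewrite | github.com/daniel-reich/ubiquitous-fiesta | qQnWXBsQaH73yY8r4_11.py | kempner
-- ===== SOURCE A (Python) =====
-- def kempner(num):
--     if num ==1:
--         return 1
--     def factorial(n):
--         fac = 1
--         for l in range(1,n+1):
--             fac *= l
--         return fac
--     for i in range(2,num+1):
--         if factorial(i)%num == 0:
--             return i
-- ===== SOURCE B (Python) =====
-- def kempner(num):
--     if num == 1:
--         return 1
--     f = 1
--     for i in range(2, num + 1):
--         f = f * i % num
--         if f == 0:
--             return i
-- ===== Notes on version B (the rewrite author's own statement) =====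
-- stated objective: faster
-- what changed: Intended as faster (probe measured B ~200x at the largest size both Pythons finished, unconfirmed as a label): B keeps a single running factorial reduced modulo num in one pass instead of recomputing the full bigint factorial from scratch for every candidate i.
-- outside the precondition, e.g. on kempner(0): A returns None, B returns None
import Mathlib
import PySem

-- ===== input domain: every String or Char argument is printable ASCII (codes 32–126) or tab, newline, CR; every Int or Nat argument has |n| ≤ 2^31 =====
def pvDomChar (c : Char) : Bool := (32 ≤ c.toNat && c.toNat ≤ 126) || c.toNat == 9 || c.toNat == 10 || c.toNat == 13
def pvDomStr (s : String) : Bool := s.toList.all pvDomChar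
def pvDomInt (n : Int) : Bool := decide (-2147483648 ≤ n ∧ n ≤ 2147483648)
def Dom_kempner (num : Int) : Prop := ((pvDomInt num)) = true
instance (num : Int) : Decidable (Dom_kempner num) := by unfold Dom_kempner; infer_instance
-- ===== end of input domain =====

-- B replaces A's per-candidate full bigint factorial with one running factorial kept reduced mod num; intended as faster (timing run read it ~200x at the largest size both finished, but could not confirm the label).
-- Python's range is lazy, so each 'for i in range(..)' loop is ported as a counter recursion.

-- ===== PORT A =====
-- inner helper 'factorial': fac = 1; for l in range(1, n+1): fac *= l
def facAloop (n l fac : Int) : Int :=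
  if l < n + 1 then facAloop n (l + 1) (fac * l) else fac
termination_by (n + 1 - l).toNat
decreasing_by omega

def facA (n : Int) : Int := facAloop n 1 1

-- for i in range(2, num+1): if factorial(i) % num == 0: return i  (falls off the end → None, excluded by Pre_)
def kloopA (num i : Int) : Int :=
  if i < num + 1 then
    if PySem.Int.mod (facA i) num = 0 then i else kloopA num (i + 1)
  else 0   -- Python A returns None here; Pre_ excludes these inputs
termination_by (num + 1 - i).toNat
decreasing_by omega

def kempner (num : Int) : Int :=
  if num = 1 then 1 else kloopA num 2

-- ===== PORT B =====
-- f = 1; for i in range(2, num+1): f = f * i % num; if f == 0: return i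
def kloopB (num i f : Int) : Int :=
  if i < num + 1 then
    let f' := PySem.Int.mod (f * i) num
    if f' = 0 then i else kloopB num (i + 1) f'
  else 0   -- Python B returns None here; Pre_ excludes these inputs
termination_by (num + 1 - i).toNat
decreasing_by omega

def kempner_alt (num : Int) : Int :=
  if num = 1 then 1 else kloopB num 2 1

-- ===== PRECONDITION & SPEC =====
-- Pre_ excludes num ≤ 0, where both Pythons fall off the loop and return None (not an int).
def Pre_kempner (num : Int) : Prop := 1 ≤ num
instance (num : Int) : Decidable (Pre_kempner num) := by unfold Pre_kempner; infer_instance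
def pvWitness_kempner : Int := (6)

def Spec_kempner (num : Int) (out : Int) : Prop := out = kempner_alt num
instance (num : Int) (out : Int) : Decidable (Spec_kempner num out) := by unfold Spec_kempner; infer_instance

-- ===== CLAIM (what is proved, stated in full; the proofs are below) =====
def Claim_equal_kempner : Prop := ∀ (num : Int), Dom_kempner num → Pre_kempner num → Spec_kempner num (kempner num)

-- ===== LEMMAS AND PROOFS =====

-- peel the LAST iteration of the factorial loop
lemma facAloop_last (n : Int) : ∀ (k : Nat) (l fac : Int), l ≤ n → (n + 1 - l).toNat = k →
    facAloop n l fac = facAloop (n - 1) l fac * n := by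
  intro k
  induction k with
  | zero => intro l fac hl hk; omega
  | succ k ih =>
    intro l fac hl hk
    by_cases hln : l < n
    · rw [facAloop, if_pos (by omega)]
      conv_rhs => rw [facAloop, if_pos (show l < n - 1 + 1 by omega)]
      exact ih (l + 1) (fac * l) (by omega) (by omega)
    · have hle : l = n := by omega
      subst hle
      rw [facAloop, if_pos (by omega), facAloop, if_neg (by omega),
          facAloop, if_neg (by omega)]

lemma facA_succ (a : Int) (h : 1 ≤ a) : facA a = facA (a - 1) * a := by
  unfold facA
  exact facAloop_last a (a + 1 - 1).toNat 1 1 h rfl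

lemma mod_mul_mod (x a n : Int) (hn : 0 < n) :
    PySem.Int.mod (PySem.Int.mod x n * a) n = PySem.Int.mod (x * a) n := by
  rw [PySem.Int.mod_eq_emod_of_pos hn, PySem.Int.mod_eq_emod_of_pos hn,
      PySem.Int.mod_eq_emod_of_pos hn]
  conv_rhs => rw [Int.mul_emod]
  rw [Int.mul_emod (x % n) a n, Int.emod_emod_of_dvd _ (dvd_refl n)]

lemma loop_eq (num : Int) (h2 : 2 ≤ num) : ∀ (k : Nat) (a : Int), 2 ≤ a →
    (num + 1 - a).toNat = k →
    kloopB num a (PySem.Int.mod (facA (a - 1)) num) = kloopA num a := by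
  intro k
  induction k with
  | zero =>
    intro a ha hk
    rw [kloopB, if_neg (by omega), kloopA, if_neg (by omega)]
  | succ k ih =>
    intro a ha hk
    have hlt : a < num + 1 := by omega
    have hstep : PySem.Int.mod (PySem.Int.mod (facA (a - 1)) num * a) num
        = PySem.Int.mod (facA a) num := by
      rw [mod_mul_mod _ _ _ (by omega), ← facA_succ a (by omega)]
    rw [kloopB, if_pos hlt, kloopA, if_pos hlt]
    simp only [hstep]
    by_cases hz : PySem.Int.mod (facA a) num = 0
    · rw [if_pos hz, if_pos hz]
    · rw [if_neg hz, if_neg hz]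
      have := ih (a + 1) (by omega) (by omega)
      simpa using this

-- ===== VERDICT (by name: the statement is the Claim_ definition above) =====
theorem kempner_spec : Claim_equal_kempner := by
  intro num _ hpre
  unfold Spec_kempner kempner kempner_alt
  by_cases h1 : num = 1
  · simp [h1]
  · have h2 : 2 ≤ num := by unfold Pre_kempner at hpre; omega
    rw [if_neg h1, if_neg h1]
    have hfacA1 : facA 1 = 1 := by
      unfold facA
      rw [facAloop, if_pos (by norm_num), facAloop, if_neg (by norm_num)]
      norm_num
    have hfac1 : PySem.Int.mod (facA (2 - 1)) num = 1 := by
      norm_num [hfacA1]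
      rw [PySem.Int.mod_eq_emod_of_pos (by omega)]
      exact Int.emod_eq_of_lt (by norm_num) (by omega)
    have := loop_eq num h2 (num + 1 - 2).toNat 2 (by omega) rfl
    rw [hfac1] at this
    exact this.symm
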